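-- pv_equiv track=rewrite | github.com/stanfordnmbl/marker-enhancer | utilities.py | getMarkersPoseDetector
-- ===== SOURCE A (Python) =====
-- def getArmMarkersPoseDetector(pose_detector):
--     markers = ['RElbow', 'LElbow', 'RWrist', 'LWrist']
--     markers = [m + "_" + pose_detector for m in markers]
--
--     return markers
--
-- def getMarkersPoseDetector(pose_detector, withArms=True):
--     markers = ['Neck', 'RShoulder', 'LShoulder', 'RHip', 'LHip', 'midHip',
--                'RKnee', 'LKnee', 'RAnkle', 'LAnkle', 'RHeel', 'LHeel',
--                'RSmallToe', 'LSmallToe', 'RBigToe', 'LBigToe', 'RElbow',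
--                'LElbow', 'RWrist', 'LWrist']
--     markers = [m + "_" + pose_detector for m in markers]
--
--     if not withArms:
--         armMarkers = getArmMarkersPoseDetector(pose_detector)
--         # Remove the arm markers from markers
--         markers = [m for m in markers if m not in armMarkers]
--
--     return markers
-- ===== SOURCE B (Python) =====
-- def getMarkersPoseDetector(pose_detector, withArms=True):
--     def pair(base):
--         return ['R' + base, 'L' + base]
--     names = ['Neck'] + pair('Shoulder') + pair('Hip') + ['midHip']
--     bases = ['Knee', 'Ankle', 'Heel', 'SmallToe', 'BigToe']
--     if withArms:
--         bases = bases + ['Elbow', 'Wrist']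
--     for base in bases:
--         names = names + pair(base)
--     return [n + '_' + pose_detector for n in names]
-- ===== Notes on version B (the rewrite author's own statement) =====
-- stated objective: alternative
-- what changed: B generates the marker names from their R/L base names with a pair() helper (singletons Neck/midHip placed explicitly, arm bases appended only when withArms) instead of A's literal 20-name list followed by a membership filter.
import Mathlib
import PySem

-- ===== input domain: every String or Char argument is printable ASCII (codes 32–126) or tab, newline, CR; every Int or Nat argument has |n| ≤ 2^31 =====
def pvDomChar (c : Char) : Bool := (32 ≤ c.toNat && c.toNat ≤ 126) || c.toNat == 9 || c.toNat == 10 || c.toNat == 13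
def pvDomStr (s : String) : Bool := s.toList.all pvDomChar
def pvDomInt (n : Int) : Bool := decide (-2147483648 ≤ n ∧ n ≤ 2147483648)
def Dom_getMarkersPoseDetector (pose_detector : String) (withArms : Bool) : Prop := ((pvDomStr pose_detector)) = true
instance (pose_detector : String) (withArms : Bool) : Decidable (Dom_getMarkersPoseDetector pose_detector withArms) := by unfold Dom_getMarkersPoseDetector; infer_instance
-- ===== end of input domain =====

-- B generates the marker names from their R/L base names with a pair helper (arm bases included
-- only when withArms) instead of A's literal 20-name list followed by a membership filter.

-- ===== PORT A =====
def getArmMarkersPoseDetector (pose_detector : String) : List String :=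
  let markers := ["RElbow", "LElbow", "RWrist", "LWrist"]
  let markers := markers.map (fun m => m ++ "_" ++ pose_detector)
  markers

def getMarkersPoseDetector (pose_detector : String) (withArms : Bool) : List String :=
  let markers := ["Neck", "RShoulder", "LShoulder", "RHip", "LHip", "midHip",
                  "RKnee", "LKnee", "RAnkle", "LAnkle", "RHeel", "LHeel",
                  "RSmallToe", "LSmallToe", "RBigToe", "LBigToe", "RElbow",
                  "LElbow", "RWrist", "LWrist"]
  let markers := markers.map (fun m => m ++ "_" ++ pose_detector)
  if !withArms then
    let armMarkers := getArmMarkersPoseDetector pose_detector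
    markers.filter (fun m => decide (¬ m ∈ armMarkers))
  else
    markers

-- ===== PORT B =====
def pvPair (base : String) : List String := ["R" ++ base, "L" ++ base]

def getMarkersPoseDetector_alt (pose_detector : String) (withArms : Bool) : List String :=
  let names := ["Neck"] ++ pvPair "Shoulder" ++ pvPair "Hip" ++ ["midHip"]
  let bases := ["Knee", "Ankle", "Heel", "SmallToe", "BigToe"]
  let bases := if withArms then bases ++ ["Elbow", "Wrist"] else bases
  let names := bases.foldl (fun acc b => acc ++ pvPair b) names
  names.map (fun n => n ++ "_" ++ pose_detector)

-- ===== PRECONDITION & SPEC =====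
def Spec_getMarkersPoseDetector (pose_detector : String) (withArms : Bool) (out : List String) : Prop := out = getMarkersPoseDetector_alt pose_detector withArms
instance (pose_detector : String) (withArms : Bool) (out : List String) : Decidable (Spec_getMarkersPoseDetector pose_detector withArms out) := by unfold Spec_getMarkersPoseDetector; infer_instance

-- ===== CLAIM =====
def Claim_equal_getMarkersPoseDetector : Prop := ∀ (pose_detector : String) (withArms : Bool), Dom_getMarkersPoseDetector pose_detector withArms → Spec_getMarkersPoseDetector pose_detector withArms (getMarkersPoseDetector pose_detector withArms)

-- ===== LEMMAS AND PROOFS =====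

-- ===== VERDICT =====
theorem getMarkersPoseDetector_spec : Claim_equal_getMarkersPoseDetector := by
  intro pd withArms _
  show getMarkersPoseDetector pd withArms = getMarkersPoseDetector_alt pd withArms
  cases withArms with
  | true =>
    simp only [getMarkersPoseDetector, getMarkersPoseDetector_alt, pvPair, Bool.not_true, List.map]
    rfl
  | false =>
    simp only [getMarkersPoseDetector, getMarkersPoseDetector_alt, getArmMarkersPoseDetector,
      pvPair, Bool.not_false, if_true, List.map]
    simp
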